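-- pv_equiv track=rewrite | github.com/CesarManzoCode/StudyFlow | app/presentation/routes/ai_help.py | _estimate_minutes_from_description
-- ===== SOURCE A (Python) =====
-- def _estimate_minutes_from_description(description: str) -> int:
--     """
--     Heuristic time estimation based on step description keywords.
--     """
--     description_lower = description.lower()
--
--     # Trivial: < 1 minute
--     trivial_keywords = ["open", "click", "close", "view", "see", "read"]
--     for kw in trivial_keywords:
--         if kw in description_lower:
--             return 1
--
--     # Easy: 1-5 minutes
--     easy_keywords = ["review", "check", "copy", "paste", "download"]
--     for kw in easy_keywords:
--         if kw in description_lower: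
--             return 3
--
--     # Moderate: 5-15 minutes
--     moderate_keywords = ["write", "edit", "create", "prepare", "organize", "analyze"]
--     for kw in moderate_keywords:
--         if kw in description_lower:
--             return 10
--
--     # Hard: 15+ minutes
--     hard_keywords = ["develop", "implement", "design", "complete", "solve", "research"]
--     for kw in hard_keywords:
--         if kw in description_lower:
--             return 20
--
--     # Default: 5 minutes
--     return 5
-- ===== SOURCE B (Python) =====
-- _TIER_MINUTES = {
--     "open": 1, "click": 1, "close": 1, "view": 1, "see": 1, "read": 1,
--     "review": 3, "check": 3, "copy": 3, "paste": 3, "download": 3,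
--     "write": 10, "edit": 10, "create": 10, "prepare": 10, "organize": 10, "analyze": 10,
--     "develop": 20, "implement": 20, "design": 20, "complete": 20, "solve": 20, "research": 20,
-- }
--
-- def _estimate_minutes_from_description(description: str) -> int:
--     description_lower = description.lower()
--     matched = [minutes for kw, minutes in _TIER_MINUTES.items() if kw in description_lower]
--     return min(matched) if matched else 5
-- ===== Notes on version B (the rewrite author's own statement) =====
-- stated objective: simpler
-- what changed: Replaces four sequential keyword loops with early returns by one flat keyword->minutes table scanned once, returning the minimum matched value (tier priority equals ascending value order), default 5.
import Mathlib
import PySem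

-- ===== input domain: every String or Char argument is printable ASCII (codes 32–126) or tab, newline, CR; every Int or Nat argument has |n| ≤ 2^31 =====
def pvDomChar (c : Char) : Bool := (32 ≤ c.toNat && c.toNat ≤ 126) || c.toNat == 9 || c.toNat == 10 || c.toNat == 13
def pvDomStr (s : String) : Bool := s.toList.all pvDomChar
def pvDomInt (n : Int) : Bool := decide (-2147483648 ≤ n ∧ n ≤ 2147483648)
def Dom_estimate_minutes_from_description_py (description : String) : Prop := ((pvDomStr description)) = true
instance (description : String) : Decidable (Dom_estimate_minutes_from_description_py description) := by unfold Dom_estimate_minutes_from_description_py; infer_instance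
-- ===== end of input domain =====

-- B replaces A's four early-return keyword loops by one flat keyword→minutes table and a min-reduction (simpler; tier priority = ascending value order).

-- ===== PORT A =====
def estimate_minutes_from_description_py (description : String) : Int :=
  let dl := PySem.Str.lower description
  if ["open","click","close","view","see","read"].any (fun kw => PySem.Str.isIn kw dl) then 1
  else if ["review","check","copy","paste","download"].any (fun kw => PySem.Str.isIn kw dl) then 3
  else if ["write","edit","create","prepare","organize","analyze"].any (fun kw => PySem.Str.isIn kw dl) then 10
  else if ["develop","implement","design","complete","solve","research"].any (fun kw => PySem.Str.isIn kw dl) then 20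
  else 5

-- ===== PORT B =====
def pvTierTable : List (String × Int) :=
  [("open",1),("click",1),("close",1),("view",1),("see",1),("read",1),
   ("review",3),("check",3),("copy",3),("paste",3),("download",3),
   ("write",10),("edit",10),("create",10),("prepare",10),("organize",10),("analyze",10),
   ("develop",20),("implement",20),("design",20),("complete",20),("solve",20),("research",20)]

def estimate_minutes_from_description_py_alt (description : String) : Int :=
  let dl := PySem.Str.lower description
  let matched := (pvTierTable.filter (fun q => PySem.Str.isIn q.1 dl)).map Prod.snd
  match PySem.List.min? matched (fun x => x) with
  | some m => m
  | none => 5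

-- ===== PRECONDITION & SPEC =====
def Spec_estimate_minutes_from_description_py (description : String) (out : Int) : Prop := out = estimate_minutes_from_description_py_alt description
instance (description : String) (out : Int) : Decidable (Spec_estimate_minutes_from_description_py description out) := by unfold Spec_estimate_minutes_from_description_py; infer_instance

-- ===== CLAIM (what is proved, stated in full; the proofs are below) =====
def Claim_equal_estimate_minutes_from_description_py : Prop := ∀ (description : String), Dom_estimate_minutes_from_description_py description → Spec_estimate_minutes_from_description_py description (estimate_minutes_from_description_py description)

-- ===== LEMMAS AND PROOFS =====

-- one tier of the table, filtered: a run of copies of its value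
lemma pv_filt_group (kws : List String) (v : Int) (dl : String) :
    (((kws.map (fun k => (k, v))).filter (fun q => PySem.Str.isIn q.1 dl)).map Prod.snd)
      = List.replicate (kws.countP (fun kw => PySem.Str.isIn kw dl)) v := by
  induction kws with
  | nil => rfl
  | cons k ks ih =>
    by_cases h : PySem.Str.isIn k dl <;>
      simp_all [List.replicate_succ]

lemma pv_foldl_min_of_le (a : Int) (l : List Int) (h : ∀ b ∈ l, a ≤ b) :
    l.foldl min a = a := by
  induction l with
  | nil => rfl
  | cons b t ih =>
    have hab : min a b = a := min_eq_left (h b (by simp))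
    simp only [List.foldl_cons, hab]
    exact ih (fun c hc => h c (by simp [hc]))

-- a run of k copies of v in front, v below everything behind: min is v when the run is nonempty
lemma pv_min_run (k : Nat) (v : Int) (rest : List Int) (hrest : ∀ b ∈ rest, v ≤ b) (d : Int) :
    (match PySem.List.min? (List.replicate k v ++ rest) (fun x => x) with
     | some m => m
     | none => d)
    = if 0 < k then v
      else (match PySem.List.min? rest (fun x => x) with | some m => m | none => d) := by
  cases k with
  | zero => simp
  | succ n =>
    have h1 : ∀ b ∈ List.replicate n v ++ rest, v ≤ b := by
      intro b hb
      rcases List.mem_append.mp hb with h | h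
      · simp [List.eq_of_mem_replicate h]
      · exact hrest b h
    rw [List.replicate_succ, List.cons_append, PySem.List.min?_id_cons,
        pv_foldl_min_of_le v _ h1]
    simp

-- min over the concatenated tier runs equals the first-nonempty-tier chain
lemma pv_main_min (k1 k2 k3 k4 : Nat) :
    (match PySem.List.min?
        (List.replicate k1 (1:Int) ++ List.replicate k2 (3:Int) ++ List.replicate k3 (10:Int) ++ List.replicate k4 (20:Int))
        (fun x => x) with
     | some m => m
     | none => 5) =
    (if 0 < k1 then 1 else if 0 < k2 then 3 else if 0 < k3 then 10 else if 0 < k4 then 20 else 5) := by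
  rw [← List.append_nil (List.replicate k4 (20:Int))]
  simp only [List.append_assoc]
  rw [pv_min_run k1 1 _ (by intro b hb; simp [List.mem_append, List.mem_replicate] at hb; omega) 5]
  rw [pv_min_run k2 3 _ (by intro b hb; simp [List.mem_append, List.mem_replicate] at hb; omega) 5]
  rw [pv_min_run k3 10 _ (by intro b hb; simp [List.mem_append, List.mem_replicate] at hb; omega) 5]
  rw [pv_min_run k4 20 [] (by intro b hb; simp at hb) 5]
  simp [PySem.List.min?]

-- ===== VERDICT (by name: the statement is the Claim_ definition above) =====
theorem estimate_minutes_from_description_py_spec : Claim_equal_estimate_minutes_from_description_py := by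
  intro d _
  unfold Spec_estimate_minutes_from_description_py
  unfold estimate_minutes_from_description_py estimate_minutes_from_description_py_alt
  have htable : pvTierTable =
      (["open","click","close","view","see","read"].map (fun k => (k,(1:Int)))) ++
      (["review","check","copy","paste","download"].map (fun k => (k,(3:Int)))) ++
      (["write","edit","create","prepare","organize","analyze"].map (fun k => (k,(10:Int)))) ++
      (["develop","implement","design","complete","solve","research"].map (fun k => (k,(20:Int)))) := by rfl
  rw [htable]
  dsimp only
  rw [List.filter_append, List.filter_append, List.filter_append,
      List.map_append, List.map_append, List.map_append,
      pv_filt_group, pv_filt_group, pv_filt_group, pv_filt_group, pv_main_min]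
  by_cases h1 : ["open","click","close","view","see","read"].any
      (fun kw => PySem.Str.isIn kw (PySem.Str.lower d)) <;>
  by_cases h2 : ["review","check","copy","paste","download"].any
      (fun kw => PySem.Str.isIn kw (PySem.Str.lower d)) <;>
  by_cases h3 : ["write","edit","create","prepare","organize","analyze"].any
      (fun kw => PySem.Str.isIn kw (PySem.Str.lower d)) <;>
  by_cases h4 : ["develop","implement","design","complete","solve","research"].any
      (fun kw => PySem.Str.isIn kw (PySem.Str.lower d)) <;>
  simp_all [List.any_eq_true, List.countP_pos_iff]
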